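-- pv_equiv track=rewrite | github.com/yashshingvi/AgentNexus | agents/creative_agent.py | _determine_creative_approach
-- ===== SOURCE A (Python) =====
-- def _determine_creative_approach(task_description: str) -> str:
--     """Determine the most appropriate creative approach for the task."""
--     task_lower = task_description.lower()
--
--     if any(word in task_lower for word in ["story", "narrative", "tale", "fiction"]):
--         return "storytelling"
--     elif any(word in task_lower for word in ["poem", "poetry", "verse", "rhyme"]):
--         return "poetry"
--     elif any(word in task_lower for word in ["design", "visual", "art", "graphic"]):
--         return "visual_design"
--     elif any(word in task_lower for word in ["idea", "concept", "innovation", "invention"]):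
--         return "ideation"
--     elif any(word in task_lower for word in ["solution", "problem", "solve", "fix"]):
--         return "creative_problem_solving"
--     elif any(word in task_lower for word in ["brainstorm", "generate", "create"]):
--         return "brainstorming"
--     else:
--         return "general_creativity"
-- ===== SOURCE B (Python) =====
-- _NAMES = [
--     "storytelling",
--     "poetry",
--     "visual_design",
--     "ideation",
--     "creative_problem_solving",
--     "brainstorming",
--     "general_creativity",
-- ]
--
-- # Flat keyword -> priority map (priority = index of the branch in the original chain).
-- _KEYWORD_PRIORITY = {
--     "story": 0, "narrative": 0, "tale": 0, "fiction": 0,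
--     "poem": 1, "poetry": 1, "verse": 1, "rhyme": 1,
--     "design": 2, "visual": 2, "art": 2, "graphic": 2,
--     "idea": 3, "concept": 3, "innovation": 3, "invention": 3,
--     "solution": 4, "problem": 4, "solve": 4, "fix": 4,
--     "brainstorm": 5, "generate": 5, "create": 5,
-- }
--
--
-- def _determine_creative_approach(task_description: str) -> str:
--     """Determine the most appropriate creative approach for the task."""
--     task_lower = task_description.lower()
--     # Exhaustively score every keyword and keep the minimum matched priority
--     # (no early exit, no grouping); the branch chain is equivalent to argmin.
--     best = 6
--     for keyword, priority in _KEYWORD_PRIORITY.items():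
--         if keyword in task_lower and priority < best:
--             best = priority
--     return _NAMES[best]
-- ===== Notes on version B (the rewrite author's own statement) =====
-- stated objective: alternative
-- what changed: Instead of a priority-ordered if/elif chain that stops at the first matching keyword group, B scans one flat keyword->priority map exhaustively, keeps the minimum matched priority (argmin, no early exit, no grouping), and indexes a name table with it.
import Mathlib
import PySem

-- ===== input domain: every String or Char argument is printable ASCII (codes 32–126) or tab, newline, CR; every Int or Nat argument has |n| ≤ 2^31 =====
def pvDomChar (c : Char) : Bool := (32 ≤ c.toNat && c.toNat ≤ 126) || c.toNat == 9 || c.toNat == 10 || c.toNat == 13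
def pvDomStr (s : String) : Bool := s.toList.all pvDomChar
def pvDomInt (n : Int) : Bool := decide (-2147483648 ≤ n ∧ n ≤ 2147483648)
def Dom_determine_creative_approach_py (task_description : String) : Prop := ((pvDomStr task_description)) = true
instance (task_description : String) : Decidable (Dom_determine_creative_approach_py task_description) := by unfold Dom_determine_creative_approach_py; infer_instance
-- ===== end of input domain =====

-- B replaces A's priority-ordered first-match branch chain by an exhaustive argmin over a flat keyword->priority map; objective: alternative.


-- ===== PORT A =====
def determine_creative_approach_py (task_description : String) : String :=
  let task_lower := PySem.Str.lower task_description
  if ["story", "narrative", "tale", "fiction"].any (fun word => PySem.Str.isIn word task_lower) then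
    "storytelling"
  else if ["poem", "poetry", "verse", "rhyme"].any (fun word => PySem.Str.isIn word task_lower) then
    "poetry"
  else if ["design", "visual", "art", "graphic"].any (fun word => PySem.Str.isIn word task_lower) then
    "visual_design"
  else if ["idea", "concept", "innovation", "invention"].any (fun word => PySem.Str.isIn word task_lower) then
    "ideation"
  else if ["solution", "problem", "solve", "fix"].any (fun word => PySem.Str.isIn word task_lower) then
    "creative_problem_solving"
  else if ["brainstorm", "generate", "create"].any (fun word => PySem.Str.isIn word task_lower) then
    "brainstorming"
  else
    "general_creativity"

-- ===== PORT B =====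
def pvNames : List String :=
  ["storytelling", "poetry", "visual_design", "ideation",
   "creative_problem_solving", "brainstorming", "general_creativity"]

def pvKeywordPriority : List (String × Nat) :=
  [("story", 0), ("narrative", 0), ("tale", 0), ("fiction", 0),
   ("poem", 1), ("poetry", 1), ("verse", 1), ("rhyme", 1),
   ("design", 2), ("visual", 2), ("art", 2), ("graphic", 2),
   ("idea", 3), ("concept", 3), ("innovation", 3), ("invention", 3),
   ("solution", 4), ("problem", 4), ("solve", 4), ("fix", 4),
   ("brainstorm", 5), ("generate", 5), ("create", 5)]

def determine_creative_approach_py_alt (task_description : String) : String :=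
  let task_lower := PySem.Str.lower task_description
  let best := pvKeywordPriority.foldl
    (fun best kp => if PySem.Str.isIn kp.1 task_lower ∧ kp.2 < best then kp.2 else best) 6
  -- `best` is always ≤ 6, so getD is exactly Python's _NAMES[best]
  pvNames.getD best "general_creativity"

-- ===== PRECONDITION & SPEC =====
def Spec_determine_creative_approach_py (task_description : String) (out : String) : Prop := out = determine_creative_approach_py_alt task_description
instance (task_description : String) (out : String) : Decidable (Spec_determine_creative_approach_py task_description out) := by unfold Spec_determine_creative_approach_py; infer_instance

-- ===== CLAIM (what is proved, stated in full; the proofs are below) =====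
def Claim_equal_determine_creative_approach_py : Prop := ∀ (task_description : String), Dom_determine_creative_approach_py task_description → Spec_determine_creative_approach_py task_description (determine_creative_approach_py task_description)

-- ===== LEMMAS AND PROOFS =====

-- Folding B's step over a constant-priority group of keywords yields `min p a`
-- if some keyword of the group matches, and leaves the accumulator unchanged otherwise.
theorem pv_foldl_const_group (t : String) (p : Nat) (kws : List String) :
    ∀ a : Nat,
      List.foldl (fun best kp => if PySem.Str.isIn kp.1 t ∧ kp.2 < best then kp.2 else best) a
        (kws.map (fun k => (k, p)))
      = if kws.any (fun word => PySem.Str.isIn word t) then Nat.min p a else a := by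
  induction kws with
  | nil => intro a; simp
  | cons kw rest ih =>
    intro a
    simp only [List.map, List.foldl, List.any_cons]
    by_cases h : PySem.Str.isIn kw t = true
    · simp only [h, true_and, Bool.true_or, ih]
      split_ifs with hlt hany <;> simp [Nat.min_def] <;> omega
    · rw [if_neg (fun hx => h hx.1), ih]
      rw [Bool.not_eq_true] at h
      simp only [h, Bool.false_or]

theorem pvKeywordPriority_groups :
    pvKeywordPriority =
      (["story", "narrative", "tale", "fiction"].map (fun k => (k, 0)))
      ++ (["poem", "poetry", "verse", "rhyme"].map (fun k => (k, 1)))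
      ++ (["design", "visual", "art", "graphic"].map (fun k => (k, 2)))
      ++ (["idea", "concept", "innovation", "invention"].map (fun k => (k, 3)))
      ++ (["solution", "problem", "solve", "fix"].map (fun k => (k, 4)))
      ++ (["brainstorm", "generate", "create"].map (fun k => (k, 5))) := by
  rfl

-- ===== VERDICT (by name: the statement is the Claim_ definition above) =====
set_option maxHeartbeats 1000000 in
theorem determine_creative_approach_py_spec : Claim_equal_determine_creative_approach_py := by
  intro td _
  unfold Spec_determine_creative_approach_py
  unfold determine_creative_approach_py determine_creative_approach_py_alt
  rw [pvKeywordPriority_groups]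
  simp only [List.foldl_append, pv_foldl_const_group]
  split_ifs <;> simp_all [pvNames]
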